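-- pv_equiv track=rewrite | github.com/TristanLee187/CPPython | Codeforces/CompetitionRounds/R739/D.py | f
-- ===== SOURCE A (Python) =====
-- def f(a,b):
--     ans=0
--     p=0
--     i=0
--     while i<len(a) and p<len(b):
--         if a[i]==b[p]:
--             p+=1
--         else:
--             ans+=1
--         i+=1
--     ans+=len(b)-p+len(a)-i
--     return ans
-- ===== SOURCE B (Python) =====
-- def f(a, b):
--     # Build an index value -> list of its positions in a (increasing), then match b
--     # greedily, binary-searching each element's first usable position instead of
--     # scanning a with a pointer.
--     pos = {}
--     for j, x in enumerate(a):
--         pos.setdefault(x, []).append(j)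
--     m = 0
--     nxt = 0
--     for x in b:
--         lst = pos.get(x, [])
--         lo, hi = 0, len(lst)
--         while lo < hi:
--             mid = (lo + hi) // 2
--             if lst[mid] < nxt:
--                 lo = mid + 1
--             else:
--                 hi = mid
--         if lo == len(lst):
--             break
--         m += 1
--         nxt = lst[lo] + 1
--     return len(a) + len(b) - 2 * m
-- ===== Notes on version B (the rewrite author's own statement) =====
-- stated objective: alternative
-- what changed: Replaces A's single two-pointer scan with a running edit counter by a value-to-positions index built over a once, a per-element binary search in that index to find each b-element's first usable position (no pointer scan over a), and the closed form len(a)+len(b)-2*matches.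
import Mathlib
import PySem

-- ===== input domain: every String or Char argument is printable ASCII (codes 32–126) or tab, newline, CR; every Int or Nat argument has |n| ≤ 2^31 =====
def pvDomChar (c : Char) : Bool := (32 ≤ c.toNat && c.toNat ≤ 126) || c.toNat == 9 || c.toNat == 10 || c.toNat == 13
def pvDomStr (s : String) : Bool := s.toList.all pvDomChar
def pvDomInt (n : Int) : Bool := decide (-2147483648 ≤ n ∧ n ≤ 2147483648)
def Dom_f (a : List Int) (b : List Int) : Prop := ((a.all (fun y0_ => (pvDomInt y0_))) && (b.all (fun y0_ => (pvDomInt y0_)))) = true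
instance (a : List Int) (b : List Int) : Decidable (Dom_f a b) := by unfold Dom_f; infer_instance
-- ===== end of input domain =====

-- B replaces A's two-pointer walk by a value→positions index of a plus a binary search
-- per element of b (no pointer scan over a), returning len(a)+len(b)-2*matches (alternative algorithm).


-- ===== PORT A =====
-- the while loop of A: state (i, p, ans); returns the state when the condition fails
def fLoop (a : List Int) (b : List Int) (i p : Nat) (ans : Int) : Nat × Nat × Int :=
  if _h : i < a.length ∧ p < b.length then
    if a[i]! = b[p]! then fLoop a b (i + 1) (p + 1) ans
    else fLoop a b (i + 1) p (ans + 1)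
  else (i, p, ans)
termination_by a.length - i

def f (a : List Int) (b : List Int) : Int :=
  let st := fLoop a b 0 0 0
  st.2.2 + ((b.length : Int) - st.2.1 + ((a.length : Int) - st.1))

-- ===== PORT B =====
-- 'pos.setdefault(x, []).append(j)' = store (pos.get(x, []) ++ [j]) at x = Dict.modify
def buildPos (a : List Int) : PySem.Dict Int (List Int) :=
  (PySem.List.enumerate a).foldl (fun d p => d.modify p.2 [] (· ++ [p.1])) PySem.Dict.empty

-- the inner while loop: binary search for the first element of lst that is ≥ t
def lowerBound (lst : List Int) (t : Int) (lo hi : Nat) : Nat :=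
  if _h : lo < hi then
    let mid := (lo + hi) / 2
    if lst[mid]! < t then lowerBound lst t (mid + 1) hi else lowerBound lst t lo mid
  else lo
termination_by hi - lo
decreasing_by all_goals omega

-- the for loop over b: state (nxt, m); returns m
def bLoopB (pos : PySem.Dict Int (List Int)) : List Int → Int → Nat → Nat
  | [], _, m => m
  | x :: bs, nxt, m =>
    let lst := pos.getD x []
    let lo := lowerBound lst nxt 0 lst.length
    if lo = lst.length then m
    else bLoopB pos bs (lst[lo]! + 1) (m + 1)

def f_alt (a : List Int) (b : List Int) : Int :=
  (a.length : Int) + (b.length : Int) - 2 * (bLoopB (buildPos a) b 0 0 : Int)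

-- ===== PRECONDITION & SPEC =====
def Spec_f (a : List Int) (b : List Int) (out : Int) : Prop := out = f_alt a b
instance (a : List Int) (b : List Int) (out : Int) : Decidable (Spec_f a b out) := by unfold Spec_f; infer_instance

-- ===== CLAIM (what is proved, stated in full; the proofs are below) =====
def Claim_equal_f : Prop := ∀ (a : List Int) (b : List Int), Dom_f a b → Spec_f a b (f a b)

-- ===== LEMMAS AND PROOFS =====

-- the common specification: the greedy in-order match count of b inside a
def mc : List Int → List Int → Nat
  | _, [] => 0
  | [], _ :: _ => 0
  | y :: as, x :: bs => if y = x then mc as bs + 1 else mc as (x :: bs)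
termination_by l₁ _ => l₁.length + 1

-- A's loop, with the tail correction applied, computes len a + len b - 2 * (greedy matches)
theorem loop_invA (a b : List Int) (i p : Nat) (ans : Int)
    (hi : i ≤ a.length) (hp : p ≤ b.length) :
    (fLoop a b i p ans).2.2
      + ((b.length : Int) - (fLoop a b i p ans).2.1
         + ((a.length : Int) - (fLoop a b i p ans).1))
    = ans + ((a.length : Int) - i) + ((b.length : Int) - p)
        - 2 * (mc (a.drop i) (b.drop p) : Int) := by
  induction i, p, ans using fLoop.induct a b with
  | case1 i p ans h heq ih =>
    rw [fLoop, dif_pos h, if_pos heq]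
    rw [ih (by omega) (by omega)]
    have hda : a.drop i = a[i]! :: a.drop (i + 1) := by
      rw [getElem!_pos a i h.1]; exact List.drop_eq_getElem_cons h.1
    have hdb : b.drop p = b[p]! :: b.drop (p + 1) := by
      rw [getElem!_pos b p h.2]; exact List.drop_eq_getElem_cons h.2
    rw [hda, hdb]
    simp only [mc, if_pos heq]
    push_cast
    ring
  | case2 i p ans h heq ih =>
    rw [fLoop, dif_pos h, if_neg heq]
    rw [ih (by omega) hp]
    have hda : a.drop i = a[i]! :: a.drop (i + 1) := by
      rw [getElem!_pos a i h.1]; exact List.drop_eq_getElem_cons h.1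
    have hdb : b.drop p = b[p]! :: b.drop (p + 1) := by
      rw [getElem!_pos b p h.2]; exact List.drop_eq_getElem_cons h.2
    rw [hda, hdb]
    simp only [mc, if_neg heq]
    rw [← hdb]
    push_cast
    ring
  | case3 i p ans h =>
    rw [fLoop, dif_neg h]
    simp only
    rcases Nat.lt_or_ge p b.length with hpl | hpl
    · have hia : i = a.length := by omega
      have hdb : b.drop p = b[p]! :: b.drop (p + 1) := by
        rw [getElem!_pos b p hpl]; exact List.drop_eq_getElem_cons hpl
      rw [hia, List.drop_length, hdb]
      simp only [mc]
      push_cast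
      ring
    · have hpb : p = b.length := by omega
      rw [hpb, List.drop_length]
      have : mc (a.drop i) [] = 0 := by unfold mc; rfl
      rw [this]
      push_cast
      ring

-- the positions of x in a, as the B-side dict stores them
def posOf (a : List Int) (x : Int) : List Int :=
  ((PySem.List.enumerate a).filter (fun p => p.2 == x)).map (·.1)

theorem getD_buildPos_gen (l : List (Int × Int)) (d : PySem.Dict Int (List Int)) (x : Int) :
    ((l.foldl (fun d p => d.modify p.2 [] (· ++ [p.1])) d).getD x [])
      = d.getD x [] ++ (l.filter (fun p => p.2 == x)).map (·.1) := by
  induction l generalizing d with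
  | nil => simp
  | cons p l ih =>
    simp only [List.foldl_cons, ih, List.filter_cons]
    by_cases hx : p.2 = x
    · rw [hx]
      simp [PySem.Dict.getD_modify_self]
    · have hxne : x ≠ p.2 := fun h => hx h.symm
      have : (p.2 == x) = false := by simp [hx]
      rw [PySem.Dict.getD_modify, if_neg hxne, this]
      simp

theorem getD_buildPos (a : List Int) (x : Int) :
    (buildPos a).getD x [] = posOf a x := by
  unfold buildPos posOf
  rw [getD_buildPos_gen]
  simp [PySem.Dict.getD_empty]

theorem mem_posOf (a : List Int) (x j : Int) :
    j ∈ posOf a x ↔ ∃ k : Nat, k < a.length ∧ j = (k : Int) ∧ a[k]! = x := by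
  unfold posOf
  simp only [List.mem_map, List.mem_filter]
  constructor
  · rintro ⟨p, ⟨hmem, hx⟩, rfl⟩
    rw [PySem.List.mem_enumerate_iff] at hmem
    obtain ⟨k, hk, rfl⟩ := hmem
    refine ⟨k, hk, by simp, ?_⟩
    rw [getElem!_pos a k hk]
    simpa using hx
  · rintro ⟨k, hk, rfl, hx⟩
    refine ⟨((k : Int), a[k]), ⟨?_, ?_⟩, rfl⟩
    · rw [PySem.List.mem_enumerate_iff]
      exact ⟨k, hk, by simp⟩
    · rw [getElem!_pos a k hk] at hx
      simpa using hx
theorem posOf_pairwise (a : List Int) (x : Int) :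
    (posOf a x).Pairwise (· < ·) := by
  unfold posOf
  refine List.Pairwise.map _ (fun p q h => h) ?_
  exact (PySem.List.pairwise_lt_enumerate a 0).sublist List.filter_sublist

theorem posOf_strict_mono (a : List Int) (x : Int) {k k' : Nat}
    (hk : k < (posOf a x).length) (hk' : k' < (posOf a x).length) (h : k < k') :
    (posOf a x)[k] < (posOf a x)[k'] :=
  (List.pairwise_iff_getElem.mp (posOf_pairwise a x)) k k' hk hk' h

-- the binary search finds the boundary: everything before < t, everything from it on ≥ t
theorem lowerBound_spec (lst : List Int) (t : Int) (lo hi : Nat)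
    (hsort : lst.Pairwise (· < ·)) (hlo : lo ≤ hi) (hhi : hi ≤ lst.length)
    (hbefore : ∀ k, k < lo → ∀ hk : k < lst.length, lst[k] < t)
    (hafter : ∀ k, hi ≤ k → ∀ hk : k < lst.length, t ≤ lst[k]) :
    lowerBound lst t lo hi ≤ lst.length ∧
    (∀ k, k < lowerBound lst t lo hi → ∀ hk : k < lst.length, lst[k] < t) ∧
    (∀ k, lowerBound lst t lo hi ≤ k → ∀ hk : k < lst.length, t ≤ lst[k]) := by
  induction lo, hi using lowerBound.induct lst t with
  | case1 lo hi h mid hmid ih =>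
    have hmlt : mid < lst.length := by omega
    rw [getElem!_pos lst mid hmlt] at hmid
    rw [lowerBound, dif_pos h, if_pos (by rw [getElem!_pos lst mid hmlt]; exact hmid)]
    refine ih (by omega) hhi ?_ hafter
    intro k hk hklen
    rcases Nat.lt_or_ge k mid with hkm | hkm
    · exact lt_trans (List.pairwise_iff_getElem.mp hsort k mid hklen hmlt hkm) hmid
    · have : k = mid := by omega
      subst this; exact hmid
  | case2 lo hi h mid hmid ih =>
    have hmlt : mid < lst.length := by omega
    rw [getElem!_pos lst mid hmlt] at hmid
    rw [lowerBound, dif_pos h, if_neg (by rw [getElem!_pos lst mid hmlt]; exact hmid)]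
    refine ih (by omega) (by omega) hbefore ?_
    intro k hk hklen
    rcases Nat.lt_or_ge k mid with hkm | hkm
    · omega
    · rcases Nat.eq_or_lt_of_le hkm with rfl | hkm'
      · omega
      · exact le_of_lt (lt_of_le_of_lt (not_lt.mp hmid)
          (List.pairwise_iff_getElem.mp hsort mid k hmlt hklen hkm'))
  | case3 lo hi h =>
    rw [lowerBound, dif_neg h]
    have : lo = hi ∨ hi < lo := by omega
    exact ⟨by omega, fun k hk hklen => hbefore k hk hklen,
           fun k hk hklen => hafter k (by omega) hklen⟩

-- mc when x has no occurrence in a at or after position n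
theorem mc_none (a : List Int) (x : Int) (bs : List Int) (n : Nat)
    (h : ∀ k, n ≤ k → ∀ hk : k < a.length, a[k] ≠ x) :
    mc (a.drop n) (x :: bs) = 0 := by
  induction hn : a.length - n generalizing n with
  | zero =>
    rw [List.drop_eq_nil_of_le (by omega)]
    unfold mc; rfl
  | succ d ih =>
    have hlt : n < a.length := by omega
    have hda : a.drop n = a[n] :: a.drop (n + 1) := List.drop_eq_getElem_cons hlt
    rw [hda]
    simp only [mc, if_neg (h n le_rfl hlt)]
    exact ih (n + 1) (fun k hk h2 => h k (by omega) h2) (by omega)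

-- mc when the first occurrence of x at or after position n is at j
theorem mc_first (a : List Int) (x : Int) (bs : List Int) (n j : Nat)
    (hnj : n ≤ j) (hj : j < a.length) (hjx : a[j] = x)
    (hmin : ∀ k, n ≤ k → k < j → ∀ hk : k < a.length, a[k] ≠ x) :
    mc (a.drop n) (x :: bs) = mc (a.drop (j + 1)) bs + 1 := by
  induction hn : j - n generalizing n with
  | zero =>
    have : n = j := by omega
    subst this
    rw [List.drop_eq_getElem_cons hj]
    simp only [mc, if_pos hjx]
  | succ d ih =>
    have hlt : n < a.length := by omega
    rw [List.drop_eq_getElem_cons hlt]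
    simp only [mc, if_neg (hmin n le_rfl (by omega) hlt)]
    exact ih (n + 1) (by omega) (fun k hk h2 h3 => hmin k (by omega) h2 h3) (by omega)

-- B's loop counts exactly the greedy matches of the remaining b inside a.drop nxt
theorem bLoopB_inv (a : List Int) (bs : List Int) (nxt : Int) (m : Nat) (h0 : 0 ≤ nxt) :
    bLoopB (buildPos a) bs nxt m = m + mc (a.drop nxt.toNat) bs := by
  induction bs generalizing nxt m with
  | nil => simp [bLoopB, mc]
  | cons x bs ih =>
    simp only [bLoopB, getD_buildPos]
    set lst := posOf a x with hlst
    obtain ⟨hr1, hr2, hr3⟩ := lowerBound_spec lst nxt 0 lst.length (posOf_pairwise a x)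
      (Nat.zero_le _) le_rfl (by omega) (fun k hk _ => absurd hk (by omega))
    set r := lowerBound lst nxt 0 lst.length with hr
    by_cases hrl : r = lst.length
    · rw [if_pos hrl]
      have hnone : ∀ k, nxt.toNat ≤ k → ∀ hk : k < a.length, a[k] ≠ x := by
        intro k hk hklen hkx
        have hmem : (k : Int) ∈ lst := (mem_posOf a x (k : Int)).mpr ⟨k, hklen, rfl, by
          rw [getElem!_pos a k hklen]; exact hkx⟩
        obtain ⟨idx, hidx, hidxe⟩ := List.mem_iff_getElem.mp hmem
        have h2 := hr2 idx (by omega) hidx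
        rw [hidxe] at h2
        omega
      rw [mc_none a x bs nxt.toNat hnone]
      omega
    · rw [if_neg hrl]
      have hrlt : r < lst.length := by omega
      obtain ⟨k, hklen, hke, hkx⟩ := (mem_posOf a x lst[r]).mp (List.getElem_mem hrlt)
      have hge : nxt ≤ lst[r] := hr3 r le_rfl hrlt
      rw [hke] at hge
      have hmin : ∀ k', nxt.toNat ≤ k' → k' < k → ∀ hk : k' < a.length, a[k'] ≠ x := by
        intro k' hk' hk'j hk'len hk'x
        have hmem : (k' : Int) ∈ lst := (mem_posOf a x (k' : Int)).mpr ⟨k', hk'len, rfl, by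
          rw [getElem!_pos a k' hk'len]; exact hk'x⟩
        obtain ⟨idx, hidx, hidxe⟩ := List.mem_iff_getElem.mp hmem
        have hidxr : idx < r := by
          by_contra hc
          rcases Nat.eq_or_lt_of_le (not_lt.mp hc) with h | h
          · simp only [h] at hke; rw [hidxe] at hke; omega
          · have := posOf_strict_mono a x hrlt hidx h
            rw [hke, hidxe] at this
            omega
        have h3 := hr2 idx hidxr hidx
        rw [hidxe] at h3
        omega
      rw [getElem!_pos lst r hrlt, hke]
      rw [ih ((k : Int) + 1) (m + 1) (by omega)]
      have ht : ((k : Int) + 1).toNat = k + 1 := by omega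
      rw [ht]
      rw [getElem!_pos a k hklen] at hkx
      rw [mc_first a x bs nxt.toNat k (by omega) hklen hkx hmin]
      omega

-- ===== VERDICT (by name: the statement is the Claim_ definition above) =====
theorem f_spec : Claim_equal_f := by
  intro a b _
  show f a b = f_alt a b
  unfold f f_alt
  have hA := loop_invA a b 0 0 0 (Nat.zero_le _) (Nat.zero_le _)
  have hB := bLoopB_inv a b 0 0 (le_refl 0)
  simp only [Int.toNat_zero, List.drop_zero] at hA hB
  simp only [hA, hB]
  push_cast
  ring
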